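-- pv_equiv track=rewrite | github.com/bitounu/Nauka-Pythona | przyklady/przyklady/0/listing_22-8.py | znajdz_litery
-- ===== SOURCE A (Python) =====
-- def znajdz_litery(litera, lancuch):
--     polozenia = []
--     poczatek = 0
--     while lancuch.find(litera, poczatek, len(lancuch)) != -1:
--         polozenie = lancuch.find(litera, poczatek, len(lancuch))
--         polozenia.append(polozenie)
--         poczatek = polozenie + 1
--     return polozenia
-- ===== SOURCE B (Python) =====
-- def znajdz_litery(litera, lancuch):
--     return [i for i in range(len(lancuch)) if lancuch.startswith(litera, i)]
-- ===== Notes on version B (the rewrite author's own statement) =====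
-- stated objective: simpler
-- what changed: Replaced the while/find loop that jumps to the next match and maintains a moving start index by a single comprehension testing every position 0..len-1 with startswith; Pre_ excludes an empty litera, a corner where find's empty-needle convention makes A also report position len(lancuch) and either value is defensible.
-- outside the precondition, e.g. on znajdz_litery('', 'ab'): A returns [0, 1, 2], B returns [0, 1]
import Mathlib
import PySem

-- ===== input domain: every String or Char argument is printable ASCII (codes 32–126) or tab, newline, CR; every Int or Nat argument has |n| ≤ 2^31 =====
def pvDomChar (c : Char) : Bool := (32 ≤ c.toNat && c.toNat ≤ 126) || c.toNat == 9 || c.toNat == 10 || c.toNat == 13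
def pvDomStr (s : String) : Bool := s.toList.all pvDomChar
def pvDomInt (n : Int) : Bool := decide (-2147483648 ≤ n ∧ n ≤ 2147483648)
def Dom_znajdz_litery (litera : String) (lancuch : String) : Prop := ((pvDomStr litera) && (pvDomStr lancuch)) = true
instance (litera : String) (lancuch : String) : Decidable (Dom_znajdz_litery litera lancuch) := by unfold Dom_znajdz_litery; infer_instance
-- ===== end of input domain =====

-- B replaces A's while/find jump loop by a plain scan testing each index 0..len-1 with startswith (objective: simpler).

-- ===== PORT A =====
-- lemmas the port needs for termination: a successful find needs poczatek ≤ len and lands at or after poczatek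
theorem pvFindFrom_end (cs ls : List Char) (k : Nat) :
    PySem.Chars.findFrom cs ls (k : Int) (some (cs.length : Int)) =
      PySem.Chars.findFrom cs ls (k : Int) none := by
  have hn : ¬ ((cs.length : Int) < 0) := by omega
  simp [PySem.Chars.findFrom, hn, List.take_length]

theorem pvFindFrom_none_of_gt (cs ls : List Char) (k : Nat) (hk : cs.length < k) :
    PySem.Chars.findFrom cs ls (k : Int) none = -1 := by
  have hk0 : ¬ ((k : Int) < 0) := by omega
  simp only [PySem.Chars.findFrom, hk0, if_false]
  rw [if_pos (by omega)]

theorem pvFindFrom_ge (cs ls : List Char) (k : Nat)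
    (h : PySem.Chars.findFrom cs ls (k : Int) (some (cs.length : Int)) ≠ -1) :
    k ≤ cs.length ∧ k ≤ (PySem.Chars.findFrom cs ls (k : Int) (some (cs.length : Int))).toNat := by
  rw [pvFindFrom_end] at h ⊢
  by_cases hk : k ≤ cs.length
  · exact ⟨hk, by have := (PySem.Chars.findFrom_natCast_spec cs ls k hk h).1; omega⟩
  · exact absurd (pvFindFrom_none_of_gt cs ls k (by omega)) h

-- the while loop of A: poczatek starts at 0 and becomes polozenie + 1 after each found match
def znLoop (cs ls : List Char) (poczatek : Nat) (acc : List Int) : List Int :=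
  if h : PySem.Chars.findFrom cs ls (poczatek : Int) (some (cs.length : Int)) = -1 then acc
  else
    -- polozenie = lancuch.find(litera, poczatek, len(lancuch))
    let polozenie := PySem.Chars.findFrom cs ls (poczatek : Int) (some (cs.length : Int))
    znLoop cs ls (polozenie.toNat + 1) (acc ++ [polozenie])
termination_by cs.length + 1 - poczatek
decreasing_by
  have := pvFindFrom_ge cs ls poczatek h
  omega

def znajdz_litery (litera : String) (lancuch : String) : List Int :=
  znLoop lancuch.toList litera.toList 0 []

-- ===== PORT B =====
-- [i for i in range(len(lancuch)) if lancuch.startswith(litera, i)]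
-- (Python's s.startswith(p, i) for 0 ≤ i ≤ len(s) is exactly: p is a prefix of s[i:])
def znajdz_litery_alt (litera : String) (lancuch : String) : List Int :=
  (PySem.List.pyRange 0 (lancuch.toList.length : Int) 1).filter
    (fun i => PySem.Chars.startswith (lancuch.toList.drop i.toNat) litera.toList)

-- ===== PRECONDITION & SPEC =====
-- Pre_ excludes an empty litera: there str.find's empty-needle convention makes A also report
-- position len(lancuch), a corner where A's and B's values are both defensible.
def Pre_znajdz_litery (litera : String) (lancuch : String) : Prop := litera ≠ ""
instance (litera : String) (lancuch : String) : Decidable (Pre_znajdz_litery litera lancuch) := by unfold Pre_znajdz_litery; infer_instance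

def pvWitness_znajdz_litery : String × String := ("a", "abca")

def Spec_znajdz_litery (litera : String) (lancuch : String) (out : List Int) : Prop := out = znajdz_litery_alt litera lancuch
instance (litera : String) (lancuch : String) (out : List Int) : Decidable (Spec_znajdz_litery litera lancuch out) := by unfold Spec_znajdz_litery; infer_instance

-- ===== CLAIM (what is proved, stated in full; the proofs are below) =====
def Claim_equal_znajdz_litery : Prop := ∀ (litera : String) (lancuch : String), Dom_znajdz_litery litera lancuch → Pre_znajdz_litery litera lancuch → Spec_znajdz_litery litera lancuch (znajdz_litery litera lancuch)

-- ===== LEMMAS AND PROOFS =====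

-- a successful find lands at an index ≤ len(s)
theorem pvFindFrom_le (cs ls : List Char) (k : Nat) (hk : k ≤ cs.length)
    (h : PySem.Chars.findFrom cs ls (k : Int) none ≠ -1) :
    (PySem.Chars.findFrom cs ls (k : Int) none).toNat ≤ cs.length := by
  rw [PySem.Chars.findFrom_natCast cs ls k hk] at h ⊢
  split at h
  · exact absurd rfl h
  · next hne =>
    rw [if_neg hne]
    have h1 := PySem.Chars.find_le_length (cs.drop k) ls
    have h2 : (0:Int) ≤ PySem.Chars.find (cs.drop k) ls := by
      rcases ((PySem.Chars.find_ne_neg_one_iff (cs.drop k) ls).1 hne) with h3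
      have := (PySem.Chars.find_nonneg_iff (cs.drop k) ls).2
      exact this h3
    simp only [List.length_drop] at h1
    omega

-- a prefix match at a position i ≥ k is an infix of the k-suffix
theorem pvPrefix_infix (cs ls : List Char) (k i : Nat) (hki : k ≤ i)
    (h : ls <+: cs.drop i) : ls <:+: cs.drop k := by
  have hd : cs.drop i = (cs.drop k).drop (i - k) := by
    rw [List.drop_drop]; congr 1; omega
  rw [hd] at h
  exact h.isInfix.trans (List.drop_suffix _ _).isInfix

-- loop invariant: A's loop from start k collects exactly the match positions in [k, len]
theorem znLoop_eq (cs ls : List Char) (k : Nat) (acc : List Int) :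
    znLoop cs ls k acc = acc ++ (PySem.List.pyRange (k : Int) ((cs.length : Int) + 1) 1).filter
      (fun i => PySem.Chars.startswith (cs.drop i.toNat) ls) := by
  fun_induction znLoop cs ls k acc with
  | case1 k acc h =>
    rw [pvFindFrom_end] at h
    by_cases hk : k ≤ cs.length
    · have hno : ¬ ls <:+: cs.drop k := by
        rw [← PySem.Chars.findFrom_natCast_eq_neg_one_iff cs ls k hk]; exact h
      have hnil : (PySem.List.pyRange (k : Int) ((cs.length : Int) + 1) 1).filter
          (fun i => PySem.Chars.startswith (cs.drop i.toNat) ls) = [] := by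
        rw [List.filter_eq_nil_iff]
        intro i hi
        have hmem := (PySem.List.mem_pyRange_one).1 hi
        simp only [Bool.not_eq_true]
        by_contra hsw
        have hpre : ls <+: cs.drop i.toNat :=
          (PySem.Chars.startswith_iff _ _).1 (by simpa using hsw)
        exact hno (pvPrefix_infix cs ls k i.toNat (by omega) hpre)
      rw [hnil, List.append_nil]
    · rw [PySem.List.pyRange_one_eq_nil (by omega)]
      simp
  | case2 k acc h polozenie ih =>
    obtain ⟨hk, hge⟩ := pvFindFrom_ge cs ls k h
    rw [pvFindFrom_end] at h
    have hle := pvFindFrom_le cs ls k hk h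
    have hp : polozenie = PySem.Chars.findFrom cs ls (k : Int) none := by
      simp only [polozenie, pvFindFrom_end]
    have hspec := PySem.Chars.findFrom_natCast_spec cs ls k hk h
    have hgeI : (k : Int) ≤ polozenie := hp ▸ hspec.1
    have hnn : (0:Int) ≤ polozenie := le_trans (Int.natCast_nonneg k) hgeI
    have hleI : polozenie ≤ (cs.length : Int) := by rw [hp]; omega
    have hcast1 : ((polozenie.toNat + 1 : Nat) : Int) = polozenie + 1 := by omega
    have hfail : (PySem.List.pyRange (k : Int) polozenie 1).filter
        (fun i => PySem.Chars.startswith (cs.drop i.toNat) ls) = [] := by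
      rw [List.filter_eq_nil_iff]
      intro i hi
      have hmem := (PySem.List.mem_pyRange_one).1 hi
      simp only [Bool.not_eq_true]
      by_contra hsw
      have hpre : ls <+: cs.drop i.toNat :=
        (PySem.Chars.startswith_iff _ _).1 (by simpa using hsw)
      exact hspec.2.2 i.toNat (by omega) (by rw [hp] at hmem; omega) hpre
    have hhit : PySem.Chars.startswith (cs.drop polozenie.toNat) ls = true := by
      rw [PySem.Chars.startswith_iff, hp]
      exact hspec.2.1
    rw [ih, hcast1,
      PySem.List.pyRange_one_append (k : Int) polozenie ((cs.length : Int) + 1) hgeI (by omega),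
      PySem.List.pyRange_one_append polozenie (polozenie + 1) ((cs.length : Int) + 1)
        (by omega) (by omega),
      PySem.List.pyRange_one_singleton polozenie]
    rw [List.filter_append, List.filter_append, hfail]
    simp [hhit]

-- with a nonempty needle, the extra candidate position len(s) never matches
theorem pvRange_succ_filter (cs ls : List Char) (hls : ls ≠ []) :
    (PySem.List.pyRange 0 ((cs.length : Int) + 1) 1).filter
        (fun i => PySem.Chars.startswith (cs.drop i.toNat) ls) =
      (PySem.List.pyRange 0 (cs.length : Int) 1).filter
        (fun i => PySem.Chars.startswith (cs.drop i.toNat) ls) := by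
  rw [PySem.List.pyRange_one_append 0 (cs.length : Int) ((cs.length : Int) + 1) (by omega) (by omega),
    PySem.List.pyRange_one_singleton (cs.length : Int), List.filter_append]
  have hno : PySem.Chars.startswith ([] : List Char) ls = false := by
    by_contra hc
    have := (PySem.Chars.startswith_iff ([] : List Char) ls).1 (by simpa using hc)
    exact hls (List.prefix_nil.mp this)
  simp [hno]

-- ===== VERDICT (by name: the statement is the Claim_ definition above) =====
theorem znajdz_litery_spec : Claim_equal_znajdz_litery := by
  intro litera lancuch _ hpre
  unfold Spec_znajdz_litery znajdz_litery znajdz_litery_alt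
  rw [znLoop_eq]
  simp only [Nat.cast_zero, List.nil_append]
  rw [pvRange_succ_filter _ _ (by
    intro h
    exact hpre (by apply String.toList_inj.mp; simpa using h))]
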